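-- pv_equiv track=rewrite | github.com/rejuve-bio/annotation-query-backend | app/services/metta/metta_ground.py | get_distinct_node_edge_count
-- ===== SOURCE A (Python) =====
-- def get_distinct_node_edge_count(result_list):
--     nodes = set()
--     edges = []
--
--     for i in range(len(result_list)):
--         if result_list[i] == 'node' and i + 2 < len(result_list):
--             nodes.add(f'{result_list[i + 1]} {result_list[i + 2]}')
--         elif result_list[i] == 'edge' and i + 1 < len(result_list):
--             edges.append(result_list[i + 1])
--
--     return nodes, edges
-- ===== SOURCE B (Python) =====
-- def get_distinct_node_edge_count(result_list):
--     n = len(result_list)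
--     nodes = set()
--     i = 0
--     while True:
--         try:
--             i = result_list.index('node', i)
--         except ValueError:
--             break
--         if i + 2 < n:
--             nodes.add(f'{result_list[i + 1]} {result_list[i + 2]}')
--         i += 1
--     edges = []
--     j = 0
--     while True:
--         try:
--             j = result_list.index('edge', j)
--         except ValueError:
--             break
--         if j + 1 < n:
--             edges.append(result_list[j + 1])
--         j += 1
--     return nodes, edges
-- ===== Notes on version B (the rewrite author's own statement) =====
-- stated objective: alternative
-- what changed: Replaces A's scan that tests every index against both markers by two independent search-and-jump while-loops: each repeatedly calls result_list.index('node'/'edge', start) to leap directly to the next marker occurrence and handles only those positions, terminating on ValueError.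
import Mathlib
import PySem

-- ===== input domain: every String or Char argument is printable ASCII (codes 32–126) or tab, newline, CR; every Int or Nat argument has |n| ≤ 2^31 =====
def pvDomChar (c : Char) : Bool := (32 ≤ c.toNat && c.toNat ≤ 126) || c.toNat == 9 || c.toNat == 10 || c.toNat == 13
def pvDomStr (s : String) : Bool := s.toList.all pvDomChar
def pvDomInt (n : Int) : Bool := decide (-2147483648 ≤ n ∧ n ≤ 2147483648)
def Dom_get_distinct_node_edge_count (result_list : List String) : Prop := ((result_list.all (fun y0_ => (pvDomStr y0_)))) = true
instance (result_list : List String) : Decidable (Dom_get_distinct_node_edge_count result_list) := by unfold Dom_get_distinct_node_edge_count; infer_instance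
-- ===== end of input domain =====

-- B replaces A's scan of every index by two search-and-jump loops over list.index('node'/'edge', start) (alternative algorithm; same asymptotic cost).

-- ===== PORT A =====
-- literal port of A: one loop over range(len(result_list)) carrying (nodes, edges) with if/elif
def get_distinct_node_edge_count (result_list : List String) : List String × List String :=
  (PySem.List.pyRange 0 (result_list.length : Int) 1).foldl
    (fun (st : PySem.Set String × List String) i =>
      if PySem.List.pyGetD result_list i "" = "node" ∧ i + 2 < (result_list.length : Int) then
        (PySem.Set.add st.1
          (PySem.List.pyGetD result_list (i + 1) "" ++ " " ++ PySem.List.pyGetD result_list (i + 2) ""),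
         st.2)
      else if PySem.List.pyGetD result_list i "" = "edge" ∧ i + 1 < (result_list.length : Int) then
        (st.1, st.2 ++ [PySem.List.pyGetD result_list (i + 1) ""])
      else st)
    (PySem.Set.empty, [])

-- ===== PORT B =====
-- stdlib call result_list.index(x, s): first position ≥ s holding x, ported via idxOf? on the dropped prefix
def pyIndexFrom (l : List String) (x : String) (s : Nat) : Option Nat :=
  (List.idxOf? x (l.drop s)).map (· + s)

-- bounds of a successful search (the B loops cite this for termination)
theorem pyIndexFrom_bounds {l : List String} {x : String} {s p : Nat}
    (h : pyIndexFrom l x s = some p) : s ≤ p ∧ p < l.length := by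
  unfold pyIndexFrom at h
  rcases Option.map_eq_some_iff.mp h with ⟨k, hk, hp⟩
  rcases List.idxOf?_eq_some_iff.mp hk with ⟨hlt, _, _⟩
  simp only [List.length_drop] at hlt
  omega

-- literal port of B's first while-loop: jump to the next 'node', handle it, resume past it
def nodeLoop (rl : List String) (nodes : PySem.Set String) (i : Nat) : PySem.Set String :=
  match h : pyIndexFrom rl "node" i with
  | none => nodes
  | some p =>
    nodeLoop rl
      (if p + 2 < rl.length then
        PySem.Set.add nodes (rl.getD (p + 1) "" ++ " " ++ rl.getD (p + 2) "")
       else nodes)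
      (p + 1)
termination_by rl.length - i
decreasing_by
  have := pyIndexFrom_bounds h
  omega

-- literal port of B's second while-loop: jump to the next 'edge', handle it, resume past it
def edgeLoop (rl : List String) (edges : List String) (j : Nat) : List String :=
  match h : pyIndexFrom rl "edge" j with
  | none => edges
  | some p =>
    edgeLoop rl
      (if p + 1 < rl.length then edges ++ [rl.getD (p + 1) ""] else edges)
      (p + 1)
termination_by rl.length - j
decreasing_by
  have := pyIndexFrom_bounds h
  omega

def get_distinct_node_edge_count_alt (result_list : List String) : List String × List String :=
  (nodeLoop result_list PySem.Set.empty 0, edgeLoop result_list [] 0)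

-- ===== PRECONDITION & SPEC =====
def Spec_get_distinct_node_edge_count (result_list : List String) (out : List String × List String) : Prop := out = get_distinct_node_edge_count_alt result_list
instance (result_list : List String) (out : List String × List String) : Decidable (Spec_get_distinct_node_edge_count result_list out) := by unfold Spec_get_distinct_node_edge_count; infer_instance

-- ===== CLAIM (what is proved, stated in full; the proofs are below) =====
def Claim_equal_get_distinct_node_edge_count : Prop := ∀ (result_list : List String), Dom_get_distinct_node_edge_count result_list → Spec_get_distinct_node_edge_count result_list (get_distinct_node_edge_count result_list)

-- ===== LEMMAS AND PROOFS =====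

-- what a successful / failed search says about the list
theorem pyIndexFrom_some {l : List String} {x : String} {s p : Nat}
    (h : pyIndexFrom l x s = some p) :
    s ≤ p ∧ p < l.length ∧ l.getD p "" = x ∧ ∀ q, s ≤ q → q < p → l.getD q "" ≠ x := by
  unfold pyIndexFrom at h
  rcases Option.map_eq_some_iff.mp h with ⟨k, hk, hp⟩
  rcases List.idxOf?_eq_some_iff.mp hk with ⟨hlt, hx, hbefore⟩
  simp only [List.length_drop] at hlt
  have hplen : p < l.length := by omega
  refine ⟨by omega, hplen, ?_, ?_⟩
  · rw [List.getElem_drop] at hx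
    have hx' : l.getD (s + k) "" = x := by
      rw [List.getD_eq_getElem l "" (by omega)]; exact hx
    have hpe : p = s + k := by omega
    rw [hpe]; exact hx'
  · intro q hsq hqp
    have hq : q < l.length := by omega
    have hj : q - s < k := by omega
    have hb := hbefore (q - s) hj
    rw [List.getElem_drop] at hb
    have hb' : l.getD (s + (q - s)) "" ≠ x := by
      rw [List.getD_eq_getElem l "" (by omega)]; exact hb
    have hqe : q = s + (q - s) := by omega
    rw [hqe]; exact hb'

theorem pyIndexFrom_none {l : List String} {x : String} {s : Nat}
    (h : pyIndexFrom l x s = none) :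
    ∀ q, s ≤ q → q < l.length → l.getD q "" ≠ x := by
  unfold pyIndexFrom at h
  have hk : List.idxOf? x (l.drop s) = none := by
    cases hh : List.idxOf? x (l.drop s) with
    | none => rfl
    | some k => rw [hh] at h; simp at h
  have hnm : x ∉ l.drop s := List.idxOf?_eq_none_iff.mp hk
  intro q hsq hq hc
  apply hnm
  have hdl : q - s < (l.drop s).length := by simp; omega
  have : (l.drop s)[q - s] = x := by
    rw [List.getElem_drop]
    have hc' : l.getD (s + (q - s)) "" = x := by
      have hqe : q = s + (q - s) := by omega
      rw [← hqe]; exact hc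
    rw [List.getD_eq_getElem l "" (by omega)] at hc'
    exact hc'
  rw [← this]
  exact List.getElem_mem hdl

-- per-index option extractors (Nat form) shared by both characterisations
def gN (rl : List String) (i : Nat) : Option String :=
  if rl.getD i "" = "node" ∧ i + 2 < rl.length
    then some (rl.getD (i+1) "" ++ " " ++ rl.getD (i+2) "") else none

def gE (rl : List String) (i : Nat) : Option String :=
  if rl.getD i "" = "edge" ∧ i + 1 < rl.length then some (rl.getD (i+1) "") else none

-- A's branches in Int-indexed form
def nodeF (rl : List String) (i : Nat) : Option String :=
  if PySem.List.pyGetD rl (i : Int) "" = "node" ∧ (i : Int) + 2 < (rl.length : Int) then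
    some (PySem.List.pyGetD rl ((i : Int) + 1) "" ++ " " ++ PySem.List.pyGetD rl ((i : Int) + 2) "")
  else none

def edgeF (rl : List String) (i : Nat) : Option String :=
  if PySem.List.pyGetD rl (i : Int) "" = "edge" ∧ (i : Int) + 1 < (rl.length : Int) then
    some (PySem.List.pyGetD rl ((i : Int) + 1) "")
  else none

theorem nodeF_eq (rl : List String) (i : Nat) : nodeF rl i = gN rl i := by
  have c1 : ((i:Int) + 1) = ((i + 1 : Nat) : Int) := by push_cast; ring
  have c2 : ((i:Int) + 2) = ((i + 2 : Nat) : Int) := by push_cast; ring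
  rw [nodeF, c1, c2]
  simp only [PySem.List.pyGetD_natCast]
  have b2 : ((i : Int) + 2 < (rl.length : Int)) ↔ i + 2 < rl.length := by omega
  simp [gN, b2]

theorem edgeF_eq (rl : List String) (i : Nat) : edgeF rl i = gE rl i := by
  have c1 : ((i:Int) + 1) = ((i + 1 : Nat) : Int) := by push_cast; ring
  rw [edgeF, c1]
  simp only [PySem.List.pyGetD_natCast]
  have b1 : ((i : Int) + 1 < (rl.length : Int)) ↔ i + 1 < rl.length := by omega
  simp [gE, b1]

-- A's loop carries the pair; split it into the two filterMaps
theorem pairFold (rl : List String) (l : List Nat) (s0 : PySem.Set String) (e0 : List String) :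
    l.foldl (fun (st : PySem.Set String × List String) (i : Nat) =>
      if PySem.List.pyGetD rl (i : Int) "" = "node" ∧ (i : Int) + 2 < (rl.length : Int) then
        (PySem.Set.add st.1
          (PySem.List.pyGetD rl ((i : Int) + 1) "" ++ " " ++ PySem.List.pyGetD rl ((i : Int) + 2) ""),
         st.2)
      else if PySem.List.pyGetD rl (i : Int) "" = "edge" ∧ (i : Int) + 1 < (rl.length : Int) then
        (st.1, st.2 ++ [PySem.List.pyGetD rl ((i : Int) + 1) ""])
      else st) (s0, e0)
    = ((l.filterMap (nodeF rl)).foldl PySem.Set.add s0, e0 ++ l.filterMap (edgeF rl)) := by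
  induction l generalizing s0 e0 with
  | nil => simp
  | cons i xs ih =>
    rw [List.foldl_cons, List.filterMap_cons, List.filterMap_cons]
    by_cases h1 : PySem.List.pyGetD rl (i : Int) "" = "node" ∧ (i : Int) + 2 < (rl.length : Int)
    · have h2 : ¬ (PySem.List.pyGetD rl (i : Int) "" = "edge" ∧ (i : Int) + 1 < (rl.length : Int)) := by
        intro h; rw [h.1] at h1; simp at h1
      rw [if_pos h1, nodeF, if_pos h1, edgeF, if_neg h2, ih]
      simp
    · by_cases h2 : PySem.List.pyGetD rl (i : Int) "" = "edge" ∧ (i : Int) + 1 < (rl.length : Int)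
      · rw [if_neg h1, if_pos h2, nodeF, if_neg h1, edgeF, if_pos h2, ih]
        simp
      · rw [if_neg h1, if_neg h2, nodeF, if_neg h1, edgeF, if_neg h2, ih]

-- B's node loop collects exactly the gN hits of the remaining index range
theorem nodeLoop_eq (rl : List String) (m : Nat) :
    ∀ i s, rl.length - i ≤ m →
    nodeLoop rl s i = ((List.range' i (rl.length - i)).filterMap (gN rl)).foldl PySem.Set.add s := by
  induction m with
  | zero =>
    intro i s h
    have h0 : rl.length - i = 0 := by omega
    rw [nodeLoop]
    cases hidx : pyIndexFrom rl "node" i with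
    | none => simp [h0]
    | some p =>
      have := pyIndexFrom_bounds hidx
      omega
  | succ m ih =>
    intro i s h
    rw [nodeLoop]
    cases hidx : pyIndexFrom rl "node" i with
    | none =>
      have hnone := pyIndexFrom_none hidx
      have : (List.range' i (rl.length - i)).filterMap (gN rl) = [] := by
        rw [List.filterMap_eq_nil_iff]
        intro q hq
        rcases List.mem_range'_1.mp hq with ⟨hiq, hql⟩
        have : rl.getD q "" ≠ "node" := hnone q hiq (by omega)
        unfold gN; exact if_neg (fun hh => this hh.1)
      simp [this]
    | some p =>
      obtain ⟨hip, hpl, hnode, hskip⟩ := pyIndexFrom_some hidx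
      have hsplit : List.range' i (rl.length - i)
          = List.range' i (p - i) ++ p :: List.range' (p + 1) (rl.length - (p + 1)) := by
        have h1 : List.range' i (p - i) ++ List.range' (i + 1 * (p - i)) ((rl.length - i) - (p - i)) 1
            = List.range' i ((p - i) + ((rl.length - i) - (p - i))) := List.range'_append
        have e1 : i + 1 * (p - i) = p := by omega
        have e2 : (p - i) + ((rl.length - i) - (p - i)) = rl.length - i := by omega
        rw [e1, e2] at h1
        rw [← h1]
        have e3 : (rl.length - i) - (p - i) = (rl.length - (p + 1)) + 1 := by omega
        rw [e3, List.range'_succ]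
      rw [hsplit, List.filterMap_append, List.filterMap_cons]
      have hpre : (List.range' i (p - i)).filterMap (gN rl) = [] := by
        rw [List.filterMap_eq_nil_iff]
        intro q hq
        rcases List.mem_range'_1.mp hq with ⟨hiq, hqp⟩
        have : rl.getD q "" ≠ "node" := hskip q hiq (by omega)
        unfold gN; exact if_neg (fun hh => this hh.1)
      rw [hpre, List.nil_append]
      have hih := ih (p + 1) (if p + 2 < rl.length then
          PySem.Set.add s (rl.getD (p + 1) "" ++ " " ++ rl.getD (p + 2) "") else s) (by omega)
      by_cases hb : p + 2 < rl.length
      · have : gN rl p = some (rl.getD (p+1) "" ++ " " ++ rl.getD (p+2) "") := by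
          unfold gN; exact if_pos ⟨hnode, hb⟩
        rw [this]
        simp only [hb, if_pos] at hih ⊢
        rw [hih, List.foldl_cons]
      · have : gN rl p = none := by
          unfold gN; exact if_neg (fun hh => hb hh.2)
        rw [this]
        simp only [hb, if_false] at hih ⊢
        rw [hih]

-- B's edge loop collects exactly the gE hits of the remaining index range
theorem edgeLoop_eq (rl : List String) (m : Nat) :
    ∀ j e, rl.length - j ≤ m →
    edgeLoop rl e j = e ++ (List.range' j (rl.length - j)).filterMap (gE rl) := by
  induction m with
  | zero =>
    intro j e h
    have h0 : rl.length - j = 0 := by omega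
    rw [edgeLoop]
    cases hidx : pyIndexFrom rl "edge" j with
    | none => simp [h0]
    | some p =>
      have := pyIndexFrom_bounds hidx
      omega
  | succ m ih =>
    intro j e h
    rw [edgeLoop]
    cases hidx : pyIndexFrom rl "edge" j with
    | none =>
      have hnone := pyIndexFrom_none hidx
      have : (List.range' j (rl.length - j)).filterMap (gE rl) = [] := by
        rw [List.filterMap_eq_nil_iff]
        intro q hq
        rcases List.mem_range'_1.mp hq with ⟨hjq, hql⟩
        have : rl.getD q "" ≠ "edge" := hnone q hjq (by omega)
        unfold gE; exact if_neg (fun hh => this hh.1)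
      simp [this]
    | some p =>
      obtain ⟨hjp, hpl, hedge, hskip⟩ := pyIndexFrom_some hidx
      have hsplit : List.range' j (rl.length - j)
          = List.range' j (p - j) ++ p :: List.range' (p + 1) (rl.length - (p + 1)) := by
        have h1 : List.range' j (p - j) ++ List.range' (j + 1 * (p - j)) ((rl.length - j) - (p - j)) 1
            = List.range' j ((p - j) + ((rl.length - j) - (p - j))) := List.range'_append
        have e1 : j + 1 * (p - j) = p := by omega
        have e2 : (p - j) + ((rl.length - j) - (p - j)) = rl.length - j := by omega
        rw [e1, e2] at h1
        rw [← h1]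
        have e3 : (rl.length - j) - (p - j) = (rl.length - (p + 1)) + 1 := by omega
        rw [e3, List.range'_succ]
      rw [hsplit, List.filterMap_append, List.filterMap_cons]
      have hpre : (List.range' j (p - j)).filterMap (gE rl) = [] := by
        rw [List.filterMap_eq_nil_iff]
        intro q hq
        rcases List.mem_range'_1.mp hq with ⟨hjq, hqp⟩
        have : rl.getD q "" ≠ "edge" := hskip q hjq (by omega)
        unfold gE; exact if_neg (fun hh => this hh.1)
      rw [hpre, List.nil_append]
      have hih := ih (p + 1) (if p + 1 < rl.length then e ++ [rl.getD (p + 1) ""] else e) (by omega)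
      by_cases hb : p + 1 < rl.length
      · have : gE rl p = some (rl.getD (p+1) "") := by
          unfold gE; exact if_pos ⟨hedge, hb⟩
        rw [this]
        simp only [hb, if_pos] at hih ⊢
        rw [hih, List.append_assoc, List.singleton_append]
      · have : gE rl p = none := by
          unfold gE; exact if_neg (fun hh => hb hh.2)
        rw [this]
        simp only [hb, if_false] at hih ⊢
        rw [hih]

theorem main_eq (rl : List String) :
    get_distinct_node_edge_count rl = get_distinct_node_edge_count_alt rl := by
  have hA : get_distinct_node_edge_count rl
      = (((List.range rl.length).filterMap (nodeF rl)).foldl PySem.Set.add PySem.Set.empty,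
         (List.range rl.length).filterMap (edgeF rl)) := by
    unfold get_distinct_node_edge_count
    rw [PySem.List.pyRange_zero_nat, List.foldl_map, pairFold]
    simp
  rw [hA]
  unfold get_distinct_node_edge_count_alt
  rw [nodeLoop_eq rl rl.length 0 PySem.Set.empty (by omega),
      edgeLoop_eq rl rl.length 0 [] (by omega)]
  rw [List.filterMap_congr (fun i _ => nodeF_eq rl i),
      List.filterMap_congr (fun i _ => edgeF_eq rl i)]
  simp [List.range_eq_range']

-- ===== VERDICT (by name: the statement is the Claim_ definition above) =====
theorem get_distinct_node_edge_count_spec : Claim_equal_get_distinct_node_edge_count := by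
  intro rl _
  unfold Spec_get_distinct_node_edge_count
  exact main_eq rl
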